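-- pv_equiv track=rewrite | github.com/4GeeksAcademy/gperdrizet-monthly-sales-analyzer-project | monthly_sales_analyzer.py | best_selling_day
-- ===== SOURCE A (Python) =====
-- def best_selling_day(data):
--     """Finds the day with the highest total sales."""
--
--     # Initialize variables to track maximum sales and the winning day
--     max_sales = 0
--     winner = None
--
--     # Loop through each day's sales data
--     for item in data:
--
--         # Calculate total sales for the day (sum of all products)
--         # Exclude the 'day' key from the su
--         total_sales = sum(item.values()) - item['day']  # Exclude the 'day' key
--
--         # Check if today's total sales are greater than the current max
--         # If so, update max_sales and winner
--         if total_sales > max_sales: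
--             max_sales = total_sales
--             winner = item['day']
--
--     return winner
-- ===== SOURCE B (Python) =====
-- def best_selling_day(data):
--     """Finds the day with the highest total sales."""
--     ranked = sorted(((sum(item.values()) - item['day'], item['day']) for item in data),
--                     key=lambda t: t[0], reverse=True)
--     if ranked and ranked[0][0] > 0:
--         return ranked[0][1]
--     return None
-- ===== Notes on version B (the rewrite author's own statement) =====
-- stated objective: alternative
-- what changed: Replaces A's single-pass running-max accumulator with a sort-based pipeline: build (total, day) pairs, stable-sort them descending by total, and read the answer off the head (applying the >0 cutoff); tie order is preserved because the sort is stable.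
import Mathlib
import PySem

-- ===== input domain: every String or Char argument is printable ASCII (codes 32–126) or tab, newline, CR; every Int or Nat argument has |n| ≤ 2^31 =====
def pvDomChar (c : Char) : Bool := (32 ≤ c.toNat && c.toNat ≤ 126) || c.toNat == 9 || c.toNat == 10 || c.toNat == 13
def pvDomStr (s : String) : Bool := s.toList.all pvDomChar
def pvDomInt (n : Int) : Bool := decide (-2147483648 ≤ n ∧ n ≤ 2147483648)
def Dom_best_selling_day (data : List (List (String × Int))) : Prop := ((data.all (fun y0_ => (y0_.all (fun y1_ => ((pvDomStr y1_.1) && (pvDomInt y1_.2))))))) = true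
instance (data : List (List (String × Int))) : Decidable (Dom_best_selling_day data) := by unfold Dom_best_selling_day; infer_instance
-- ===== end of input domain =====

-- B replaces A's running-max accumulator loop with a sort-based pipeline (build (total, day)
-- pairs, stable descending sort, read the head with the >0 cutoff); same result, no speed claim.


-- ===== PORT A =====
-- A's loop: running max (starts at 0) and current winner, updated on a strictly larger total.
-- item['day'] is ported as getD "day" 0 — exact whenever the key is present, which Pre_ guarantees.
def bsdLoopA : List (List (String × Int)) → Int → Option Int → Option Int
  | [], _, winner => winner
  | item :: rest, max_sales, winner =>
    let d := PySem.Dict.ofList item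
    let total_sales := d.values.sum - d.getD "day" 0
    if max_sales < total_sales then bsdLoopA rest total_sales (some (d.getD "day" 0))
    else bsdLoopA rest max_sales winner

def best_selling_day (data : List (List (String × Int))) : Option Int :=
  bsdLoopA data 0 none

-- ===== PORT B =====
-- Source B's pair builder: (sum(item.values()) - item['day'], item['day'])  (item['day'] as getD "day" 0; see Pre_)
def bsdPair (item : List (String × Int)) : Int × Int :=
  ((PySem.Dict.ofList item).values.sum - (PySem.Dict.ofList item).getD "day" 0,
   (PySem.Dict.ofList item).getD "day" 0)

def best_selling_day_alt (data : List (List (String × Int))) : Option Int :=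
  let ranked := PySem.List.sorted (data.map bsdPair) (fun t => t.1) true
  match ranked with
  | [] => none
  | (t, d) :: _ => if 0 < t then some d else none

-- ===== PRECONDITION & SPEC =====
-- Pre_ excludes exactly the inputs on which A (and B alike) raises KeyError: an item without a 'day' key.
def Pre_best_selling_day (data : List (List (String × Int))) : Prop :=
  ∀ item ∈ data, "day" ∈ item.map Prod.fst
instance (data : List (List (String × Int))) : Decidable (Pre_best_selling_day data) := by
  unfold Pre_best_selling_day; infer_instance

def pvWitness_best_selling_day : (List (List (String × Int))) :=
  [[("day", 1), ("apple", 5)], [("day", 2), ("pear", 3)]]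

def Spec_best_selling_day (data : List (List (String × Int))) (out : Option Int) : Prop := out = best_selling_day_alt data
instance (data : List (List (String × Int))) (out : Option Int) : Decidable (Spec_best_selling_day data out) := by unfold Spec_best_selling_day; infer_instance

-- ===== CLAIM (what is proved, stated in full; the proofs are below) =====
def Claim_equal_best_selling_day : Prop := ∀ (data : List (List (String × Int))), Dom_best_selling_day data → Pre_best_selling_day data → Spec_best_selling_day data (best_selling_day data)

-- ===== LEMMAS AND PROOFS =====

-- proof-only helpers: A's loop replayed over the pair list, and the first-strict-max fold
def bsdPLoop : List (Int × Int) → Int → Option Int → Option Int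
  | [], _, w => w
  | p :: rest, m, w =>
    if m < p.1 then bsdPLoop rest p.1 (some p.2) else bsdPLoop rest m w

def bsdBest (ps : List (Int × Int)) (b : Int × Int) : Int × Int :=
  ps.foldl (fun b p => if b.1 < p.1 then p else b) b

theorem loopA_eq_ploop (data : List (List (String × Int))) :
    ∀ (m : Int) (w : Option Int), bsdLoopA data m w = bsdPLoop (data.map bsdPair) m w := by
  induction data with
  | nil => intro m w; rfl
  | cons item rest ih =>
    intro m w
    simp only [bsdLoopA, List.map_cons, bsdPLoop, bsdPair]
    split_ifs <;> exact ih _ _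

-- the head of insertBy depends only on the old head
theorem head?_insertBy (x y : Int × Int) (ys : List (Int × Int)) :
    (PySem.List.insertBy (fun a b : Int × Int => decide (b.1 < a.1)) x (y :: ys)).head?
      = some (if y.1 < x.1 then x else y) := by
  by_cases h : y.1 < x.1 <;> simp [PySem.List.insertBy, h]

-- head of the sort's foldl form IS the first-strict-max fold
theorem head?_foldl_insertBy (ps : List (Int × Int)) :
    ∀ (acc : List (Int × Int)) (hd : Int × Int), acc.head? = some hd →
      (ps.foldl (fun acc x => PySem.List.insertBy (fun a b : Int × Int => decide (b.1 < a.1)) x acc) acc).head?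
        = some (bsdBest ps hd) := by
  induction ps with
  | nil => intro acc hd hh; simpa [bsdBest] using hh
  | cons p rest ih =>
    intro acc hd hh
    cases acc with
    | nil => simp at hh
    | cons y ys =>
      simp only [List.head?_cons, Option.some.injEq] at hh
      subst hh
      simp only [List.foldl_cons]
      rcases List.head?_eq_some_iff.mp (head?_insertBy p y ys) with ⟨t, ht⟩
      rw [ht, ih ((if y.1 < p.1 then p else y) :: t) (if y.1 < p.1 then p else y) rfl]
      simp only [bsdBest, List.foldl_cons]

-- A's loop state (on the pair list) vs the first-strict-max fold
theorem ploop_eq_best (ps : List (Int × Int)) :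
    ∀ (m : Int) (w : Option Int) (b : Int × Int),
      ((0 < b.1 ∧ m = b.1 ∧ w = some b.2) ∨ (b.1 ≤ 0 ∧ m = 0 ∧ w = none)) →
      bsdPLoop ps m w = (if 0 < (bsdBest ps b).1 then some (bsdBest ps b).2 else none) := by
  induction ps with
  | nil =>
    intro m w b h
    rcases h with ⟨hk, hm, hw⟩ | ⟨hk, hm, hw⟩ <;> subst hw <;>
      simp [bsdPLoop, bsdBest] <;> omega
  | cons p rest ih =>
    intro m w b h
    simp only [bsdPLoop, bsdBest, List.foldl_cons]
    rcases h with ⟨hk, hm, hw⟩ | ⟨hk, hm, hw⟩ <;> subst hm <;> subst hw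
    · by_cases hlt : b.1 < p.1
      · rw [if_pos hlt, if_pos hlt]
        exact ih _ _ p (Or.inl ⟨by omega, rfl, rfl⟩)
      · rw [if_neg hlt, if_neg hlt]
        exact ih _ _ b (Or.inl ⟨hk, rfl, rfl⟩)
    · by_cases h0 : (0:Int) < p.1
      · rw [if_pos h0, if_pos (by omega : b.1 < p.1)]
        exact ih _ _ p (Or.inl ⟨h0, rfl, rfl⟩)
      · rw [if_neg h0]
        by_cases hlt : b.1 < p.1
        · rw [if_pos hlt]
          exact ih _ _ p (Or.inr ⟨by omega, rfl, rfl⟩)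
        · rw [if_neg hlt]
          exact ih _ _ b (Or.inr ⟨hk, rfl, rfl⟩)

-- B on a nonempty list reads the first-strict-max pair off the head of the sort
theorem alt_cons (x : List (String × Int)) (xs : List (List (String × Int))) :
    best_selling_day_alt (x :: xs) =
      (if 0 < (bsdBest (xs.map bsdPair) (bsdPair x)).1
       then some (bsdBest (xs.map bsdPair) (bsdPair x)).2 else none) := by
  have hs := PySem.List.sorted_rev_eq_foldl_insertBy ((x :: xs).map bsdPair) (fun t : Int × Int => t.1)
  have hh : (PySem.List.sorted ((x :: xs).map bsdPair) (fun t : Int × Int => t.1) true).head?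
      = some (bsdBest (xs.map bsdPair) (bsdPair x)) := by
    rw [hs]
    simp only [List.map_cons, List.foldl_cons]
    exact head?_foldl_insertBy (xs.map bsdPair) [bsdPair x] (bsdPair x) rfl
  unfold best_selling_day_alt
  cases hsort : PySem.List.sorted ((x :: xs).map bsdPair) (fun t : Int × Int => t.1) true with
  | nil => rw [hsort] at hh; simp at hh
  | cons q t =>
    rw [hsort] at hh
    simp only [List.head?_cons, Option.some.injEq] at hh
    subst hh
    rfl

-- ===== VERDICT (by name: the statement is the Claim_ definition above) =====
theorem best_selling_day_spec : Claim_equal_best_selling_day := by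
  intro data _ _
  unfold Spec_best_selling_day best_selling_day
  cases data with
  | nil => rfl
  | cons x xs =>
    rw [alt_cons, loopA_eq_ploop]
    simp only [List.map_cons, bsdPLoop]
    by_cases h0 : (0:Int) < (bsdPair x).1
    · rw [if_pos h0]
      exact ploop_eq_best (xs.map bsdPair) _ _ (bsdPair x) (Or.inl ⟨h0, rfl, rfl⟩)
    · rw [if_neg h0]
      exact ploop_eq_best (xs.map bsdPair) _ _ (bsdPair x) (Or.inr ⟨by omega, rfl, rfl⟩)
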